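-- pv_equiv track=rewrite | github.com/natsubob/B4_kadai_sort | list_sort.py | checkIsStable
-- ===== SOURCE A (Python) =====
-- def checkIsStable(original, sorted):
--     """安定性判定メソッド
--
--     ソート前とソート後の2つのリストについて、安定性が保たれているかどうかを判定する。
--
--     Args:
--         original(list): ソート前のリスト
--         sorted(list): ソート後のリスト
--
--     Returns:
--         Boolean: Trueなら安定であり、Falseなら非安定
--     """
--     n = len(original)
--     isStable = True
--     for i in range(n):
--         for j in range(i + 1, n):
--             for a in range(n):
--                 for b in range(a + 1, n):
--                     # 同じ数字があり、ソートの前後で順序が変わる場合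
--                     if (original[i][1] == original[j][1] and
--                         original[i] == sorted[b] and original[j] == sorted[a]):
--                         isStable = False
--     return isStable
-- ===== SOURCE B (Python) =====
-- def _crossed(lst, y, x):
--     # True iff some occurrence of y in lst is strictly before some occurrence of x.
--     seen_x = False
--     for v in reversed(lst):
--         if seen_x and v == y:
--             return True
--         if v == x:
--             seen_x = True
--     return False
--
--
-- def checkIsStable(original, sorted):
--     n = len(original)
--     pre = sorted[:n]
--     for j in range(n):
--         for i in range(j):
--             if original[i][1] == original[j][1] and _crossed(pre, original[j], original[i]):
--                 return False
--     return True
-- ===== Notes on version B (the rewrite author's own statement) =====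
-- stated objective: faster
-- what changed: A's quadruple nested index loop is replaced by a double loop over pairs with equal keys plus a single right-to-left scan of sorted[:n] per pair (with early exit), removing the inner double index scan.
import Mathlib
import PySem

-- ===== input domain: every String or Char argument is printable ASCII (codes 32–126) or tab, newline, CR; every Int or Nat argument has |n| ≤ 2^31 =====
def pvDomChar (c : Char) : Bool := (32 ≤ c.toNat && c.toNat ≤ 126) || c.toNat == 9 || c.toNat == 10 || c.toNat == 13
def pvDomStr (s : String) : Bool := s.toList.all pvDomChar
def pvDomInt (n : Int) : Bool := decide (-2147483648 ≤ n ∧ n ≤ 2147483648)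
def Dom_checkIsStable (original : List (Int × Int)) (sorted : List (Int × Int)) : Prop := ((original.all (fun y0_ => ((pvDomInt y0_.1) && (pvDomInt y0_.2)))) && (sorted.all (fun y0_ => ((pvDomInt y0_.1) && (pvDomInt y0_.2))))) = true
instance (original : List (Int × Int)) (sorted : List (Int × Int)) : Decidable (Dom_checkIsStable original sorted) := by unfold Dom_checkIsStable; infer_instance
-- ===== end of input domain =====

-- B replaces A's quadruple index loop by a per-pair right-to-left scan of sorted[:n]
-- (O(n^3) with early exit instead of O(n^4)); return value proved equal on Pre_.

-- ===== PORT A =====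
-- literal transliteration of A's four nested range loops over a Boolean flag
def checkIsStable (original : List (Int × Int)) (sorted : List (Int × Int)) : Bool :=
  let n : Int := original.length
  (PySem.List.pyRange 0 n 1).foldl (fun s1 i =>
    (PySem.List.pyRange (i + 1) n 1).foldl (fun s2 j =>
      (PySem.List.pyRange 0 n 1).foldl (fun s3 a =>
        (PySem.List.pyRange (a + 1) n 1).foldl (fun s4 b =>
          if (PySem.List.pyGetD original i ((0:Int),(0:Int))).2 == (PySem.List.pyGetD original j ((0:Int),(0:Int))).2 &&
             PySem.List.pyGetD original i ((0:Int),(0:Int)) == PySem.List.pyGetD sorted b ((0:Int),(0:Int)) &&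
             PySem.List.pyGetD original j ((0:Int),(0:Int)) == PySem.List.pyGetD sorted a ((0:Int),(0:Int))
          then false else s4) s3) s2) s1) true

-- ===== PORT B =====
-- _crossed: 'for v in reversed(lst)' with state (seen_x, early-returned?)
def pvCrossed (lst : List (Int × Int)) (y x : Int × Int) : Bool :=
  (lst.foldr (fun v st =>
      if st.2 then st
      else if st.1 && v == y then (st.1, true)
      else (st.1 || v == x, false))
    (false, false)).2

def checkIsStable_alt (original : List (Int × Int)) (sorted : List (Int × Int)) : Bool :=
  let pre := sorted.take original.length          -- sorted[:n]
  !((List.range original.length).any fun j =>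
     (List.range j).any fun i =>
       (original.getD i ((0:Int),(0:Int))).2 == (original.getD j ((0:Int),(0:Int))).2 &&
       pvCrossed pre (original.getD j ((0:Int),(0:Int))) (original.getD i ((0:Int),(0:Int))))

-- ===== PRECONDITION & SPEC =====
-- Pre_ excludes exactly the inputs where A raises IndexError: sorted shorter than
-- original while original contains two entries with equal second components (only
-- then does A's short-circuit condition index sorted out of range).
def Pre_checkIsStable (original : List (Int × Int)) (sorted : List (Int × Int)) : Prop :=
  original.length ≤ sorted.length ∨ original.Pairwise (fun p q => p.2 ≠ q.2)
instance (original : List (Int × Int)) (sorted : List (Int × Int)) : Decidable (Pre_checkIsStable original sorted) := by unfold Pre_checkIsStable; infer_instance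

def pvWitness_checkIsStable : (List (Int × Int)) × (List (Int × Int)) :=
  ([(3, 1), (1, 1), (2, 2)], [(1, 1), (3, 1), (2, 2)])

def Spec_checkIsStable (original : List (Int × Int)) (sorted : List (Int × Int)) (out : Bool) : Prop := out = checkIsStable_alt original sorted
instance (original : List (Int × Int)) (sorted : List (Int × Int)) (out : Bool) : Decidable (Spec_checkIsStable original sorted out) := by unfold Spec_checkIsStable; infer_instance

-- ===== CLAIM (what is proved, stated in full; the proofs are below) =====
def Claim_equal_checkIsStable : Prop := ∀ (original : List (Int × Int)) (sorted : List (Int × Int)), Dom_checkIsStable original sorted → Pre_checkIsStable original sorted → Spec_checkIsStable original sorted (checkIsStable original sorted)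

-- ===== LEMMAS AND PROOFS =====

-- flag loop: 'if p x: flag = False' over a list
theorem pv_foldl_flag {α : Type} (l : List α) (p : α → Bool) (s : Bool) :
    l.foldl (fun s x => if p x then false else s) s = (s && !(l.any p)) := by
  induction l generalizing s with
  | nil => simp
  | cons h t ih =>
    simp only [List.foldl_cons, List.any_cons, ih]
    by_cases hp : p h = true <;> simp [hp]

theorem pv_foldl_and {α : Type} (l : List α) (p : α → Bool) (s : Bool) :
    l.foldl (fun s x => s && !(p x)) s = (s && !(l.any p)) := by
  induction l generalizing s with
  | nil => simp
  | cons h t ih =>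
    simp only [List.foldl_cons, List.any_cons, ih]
    by_cases hp : p h = true <;> simp [hp]

-- the existential that A's nested loops decide (negatively)
def PA (o s : List (Int × Int)) : Prop :=
  ∃ i, (0 ≤ i ∧ i < (o.length : Int)) ∧ ∃ j, (i + 1 ≤ j ∧ j < (o.length : Int)) ∧
    ∃ a, (0 ≤ a ∧ a < (o.length : Int)) ∧ ∃ b, (a + 1 ≤ b ∧ b < (o.length : Int)) ∧
    ((PySem.List.pyGetD o i ((0:Int),(0:Int))).2 = (PySem.List.pyGetD o j ((0:Int),(0:Int))).2 ∧
     PySem.List.pyGetD o i ((0:Int),(0:Int)) = PySem.List.pyGetD s b ((0:Int),(0:Int)) ∧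
     PySem.List.pyGetD o j ((0:Int),(0:Int)) = PySem.List.pyGetD s a ((0:Int),(0:Int)))

theorem pv_A_iff (o s : List (Int × Int)) :
    checkIsStable o s = true ↔ ¬ PA o s := by
  unfold checkIsStable
  simp only [pv_foldl_flag]
  simp only [pv_foldl_and, Bool.true_and]
  rw [show ∀ b : Bool, ((!b) = true ↔ ¬ PA o s) ↔ ((b = true) ↔ PA o s) by
    intro b; cases b <;> simp]
  unfold PA
  simp only [List.any_eq_true, PySem.List.mem_pyRange_one, Bool.and_eq_true, beq_iff_eq,
    and_assoc]

-- crossed ↔ some occurrence of y strictly before some occurrence of x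
def PC (l : List (Int × Int)) (y x : Int × Int) : Prop :=
  ∃ a b : ℕ, a < b ∧ b < l.length ∧
    l.getD a ((0:Int),(0:Int)) = y ∧ l.getD b ((0:Int),(0:Int)) = x

def pvCrossStep (y x : Int × Int) (v : Int × Int) (st : Bool × Bool) : Bool × Bool :=
  if st.2 then st
  else if st.1 && v == y then (st.1, true)
  else (st.1 || v == x, false)

theorem pvCrossed_eq_foldr (l : List (Int × Int)) (y x : Int × Int) :
    pvCrossed l y x = (l.foldr (pvCrossStep y x) (false, false)).2 := rfl

theorem pv_mem_iff (l : List (Int × Int)) (x : Int × Int) :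
    x ∈ l ↔ ∃ k, k < l.length ∧ l.getD k ((0:Int),(0:Int)) = x := by
  constructor
  · intro hx
    obtain ⟨k, hk, he⟩ := List.mem_iff_getElem.1 hx
    exact ⟨k, hk, by rw [List.getD_eq_getElem _ _ hk]; exact he⟩
  · rintro ⟨k, hk, he⟩
    rw [List.getD_eq_getElem _ _ hk] at he
    exact he ▸ List.getElem_mem hk

theorem pv_PC_cons (v : Int × Int) (t : List (Int × Int)) (y x : Int × Int) :
    PC (v :: t) y x ↔ (v = y ∧ x ∈ t) ∨ PC t y x := by
  constructor
  · rintro ⟨a, b, hab, hb, ha, hx⟩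
    match a, b with
    | 0, b + 1 =>
      exact Or.inl ⟨ha, (pv_mem_iff t x).2 ⟨b, by simpa using hb, hx⟩⟩
    | a + 1, b + 1 =>
      exact Or.inr ⟨a, b, by omega, by simpa using hb, ha, hx⟩
  · rintro (⟨hv, hx⟩ | ⟨a, b, hab, hb, ha, hx⟩)
    · obtain ⟨k, hk, he⟩ := (pv_mem_iff t x).1 hx
      exact ⟨0, k + 1, by omega, by simpa using hk, hv, he⟩
    · exact ⟨a + 1, b + 1, by omega, by simpa using hb, ha, hx⟩

theorem pv_crossed_aux (y x : Int × Int) (l : List (Int × Int)) :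
    ((l.foldr (pvCrossStep y x) (false, false)).2 = true ↔ PC l y x) ∧
    ((l.foldr (pvCrossStep y x) (false, false)).2 = false →
      (l.foldr (pvCrossStep y x) (false, false)).1 = decide (x ∈ l)) := by
  induction l with
  | nil =>
    refine ⟨by simp [PC], by simp⟩
  | cons v t ih =>
    obtain ⟨ih2, ih1⟩ := ih
    simp only [List.foldr_cons]
    by_cases h2 : (t.foldr (pvCrossStep y x) (false, false)).2 = true
    · rw [show pvCrossStep y x v (t.foldr (pvCrossStep y x) (false, false)) =
          t.foldr (pvCrossStep y x) (false, false) by simp [pvCrossStep, h2]]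
      refine ⟨⟨fun _ => (pv_PC_cons v t y x).2 (Or.inr (ih2.1 h2)), fun _ => h2⟩, ?_⟩
      intro hf; rw [h2] at hf; cases hf
    · rw [Bool.not_eq_true] at h2
      have h1 := ih1 h2
      have hnPC : ¬ PC t y x := fun hc => by rw [← ih2, h2] at hc; cases hc
      by_cases hy : ((t.foldr (pvCrossStep y x) (false, false)).1 && v == y) = true
      · rw [show pvCrossStep y x v (t.foldr (pvCrossStep y x) (false, false)) =
            ((t.foldr (pvCrossStep y x) (false, false)).1, true) by simp [pvCrossStep, h2, hy]]
        rw [Bool.and_eq_true, beq_iff_eq] at hy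
        refine ⟨⟨fun _ => ?_, fun _ => rfl⟩, fun hf => (by cases hf)⟩
        refine (pv_PC_cons v t y x).2 (Or.inl ⟨hy.2, ?_⟩)
        have := hy.1; rw [h1] at this; exact of_decide_eq_true this
      · rw [show pvCrossStep y x v (t.foldr (pvCrossStep y x) (false, false)) =
            ((t.foldr (pvCrossStep y x) (false, false)).1 || v == x, false) by
          simp only [pvCrossStep, h2]; simp [hy]]
        refine ⟨⟨fun hf => (by cases hf), fun hc => ?_⟩, fun _ => ?_⟩
        · exfalso
          rcases (pv_PC_cons v t y x).1 hc with ⟨hvy, hxt⟩ | hPCt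
          · apply hy
            rw [Bool.and_eq_true, beq_iff_eq, h1]
            exact ⟨decide_eq_true hxt, hvy⟩
          · exact hnPC hPCt
        · rw [h1]
          by_cases hvx : v = x
          · subst hvx; simp
          · have hvx1 : (v == x) = false := by simp [hvx]
            have hvx2 : decide (x = v) = false := by simp [Ne.symm hvx]
            simp [hvx1, hvx2]

theorem pv_crossed_iff (l : List (Int × Int)) (y x : Int × Int) :
    pvCrossed l y x = true ↔ PC l y x := by
  rw [pvCrossed_eq_foldr]; exact (pv_crossed_aux y x l).1

-- the existential that B's double loop decides (negatively)
def PB (o s : List (Int × Int)) : Prop :=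
  ∃ j, j < o.length ∧ ∃ i, i < j ∧
    ((o.getD i ((0:Int),(0:Int))).2 = (o.getD j ((0:Int),(0:Int))).2 ∧
     PC (s.take o.length) (o.getD j ((0:Int),(0:Int))) (o.getD i ((0:Int),(0:Int))))

theorem pv_B_iff (o s : List (Int × Int)) :
    checkIsStable_alt o s = true ↔ ¬ PB o s := by
  unfold checkIsStable_alt
  rw [show ∀ b : Bool, ((!b) = true ↔ ¬ PB o s) ↔ ((b = true) ↔ PB o s) by
    intro b; cases b <;> simp]
  unfold PB
  simp only [List.any_eq_true, List.mem_range, Bool.and_eq_true, beq_iff_eq,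
    pv_crossed_iff]

-- index-conversion helpers
theorem pv_getD_conv (l : List (Int × Int)) (k : Int) (h0 : 0 ≤ k) (hk : k < (l.length : Int)) :
    PySem.List.pyGetD l k ((0:Int),(0:Int)) = l.getD k.toNat ((0:Int),(0:Int)) := by
  rw [PySem.List.pyGetD_eq_getElem l ((0:Int),(0:Int)) h0 hk, List.getD_eq_getElem _ _ (by omega)]

theorem pv_take_getD (s : List (Int × Int)) (n k : ℕ) (hk : k < n) (hn : n ≤ s.length) :
    (s.take n).getD k ((0:Int),(0:Int)) = s.getD k ((0:Int),(0:Int)) := by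
  rw [List.getD_eq_getElem _ _ (by simp [List.length_take]; omega),
      List.getD_eq_getElem _ _ (by omega)]
  simp

theorem pv_AB (o s : List (Int × Int)) (h : Pre_checkIsStable o s) : PA o s ↔ PB o s := by
  by_cases hlen : o.length ≤ s.length
  · constructor
    · rintro ⟨i, ⟨hi0, hin⟩, j, ⟨hij, hjn⟩, a, ⟨ha0, han⟩, b, ⟨hab, hbn⟩, hkey, hib, hja⟩
      rw [pv_getD_conv o i hi0 hin] at hkey hib
      rw [pv_getD_conv o j (by omega) hjn] at hkey hja
      rw [pv_getD_conv s b (by omega) (by omega)] at hib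
      rw [pv_getD_conv s a ha0 (by omega)] at hja
      refine ⟨j.toNat, by omega, i.toNat, by omega, hkey, a.toNat, b.toNat, by omega,
        by simp [List.length_take]; omega, ?_, ?_⟩
      · rw [pv_take_getD s o.length a.toNat (by omega) hlen]; exact hja.symm
      · rw [pv_take_getD s o.length b.toNat (by omega) hlen]; exact hib.symm
    · rintro ⟨j, hj, i, hij, hkey, a, b, hab, hb, ha, hx⟩
      have hblen : b < o.length := by
        have := hb; simp [List.length_take] at this; omega
      rw [pv_take_getD s o.length a (by omega) hlen] at ha
      rw [pv_take_getD s o.length b (by omega) hlen] at hx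
      refine ⟨(i : Int), ⟨by omega, by omega⟩, (j : Int), ⟨by omega, by omega⟩,
        (a : Int), ⟨by omega, by omega⟩, (b : Int), ⟨by omega, by omega⟩, ?_, ?_, ?_⟩
      · rw [pv_getD_conv o i (by omega) (by omega), pv_getD_conv o j (by omega) (by omega)]
        simpa using hkey
      · rw [pv_getD_conv o i (by omega) (by omega), pv_getD_conv s b (by omega) (by omega)]
        simpa using hx.symm
      · rw [pv_getD_conv o j (by omega) (by omega), pv_getD_conv s a (by omega) (by omega)]
        simpa using ha.symm
  · have hpw : o.Pairwise (fun p q => p.2 ≠ q.2) := h.resolve_left hlen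
    rw [List.pairwise_iff_getElem] at hpw
    apply iff_of_false
    · rintro ⟨i, ⟨hi0, hin⟩, j, ⟨hij, hjn⟩, -, -, -, -, hkey, -, -⟩
      rw [pv_getD_conv o i hi0 hin, pv_getD_conv o j (by omega) hjn] at hkey
      rw [List.getD_eq_getElem _ _ (by omega), List.getD_eq_getElem _ _ (by omega)] at hkey
      exact hpw i.toNat j.toNat (by omega) (by omega) (by omega) hkey
    · rintro ⟨j, hj, i, hij, hkey, -⟩
      rw [List.getD_eq_getElem _ _ (by omega), List.getD_eq_getElem _ _ (by omega)] at hkey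
      exact hpw i j (by omega) (by omega) (by omega) hkey

-- ===== VERDICT (by name: the statement is the Claim_ definition above) =====
theorem checkIsStable_spec : Claim_equal_checkIsStable := by
  intro o s _ hpre
  unfold Spec_checkIsStable
  rw [Bool.eq_iff_iff, pv_A_iff, pv_B_iff, pv_AB o s hpre]
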